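-- pv_equiv track=rewrite | github.com/nobbydoo80/axis-backend | axis/core/api_v3/serializers/builder_program_metrics.py | get_dict_totals
-- ===== SOURCE A (Python) =====
-- from collections import OrderedDict, defaultdict
--
-- def get_dict_totals(obj):
--     totals = defaultdict(int)
--     try:
--         for metric in obj["data"]:
--             for key in metric:
--                 if key.endswith("_id") or key == "id":
--                     continue
--                 try:
--                     0 + metric[key]
--                 except:
--                     continue
--                 totals[key] += metric[key]
--     except KeyError:
--         pass
--     return dict(totals)
-- ===== SOURCE B (Python) =====
-- def get_dict_totals(obj):
--     if "data" not in obj: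
--         return {}
--     pairs = []
--     for metric in obj["data"]:
--         for key in metric:
--             if key.endswith("_id") or key == "id":
--                 continue
--             try:
--                 0 + metric[key]
--             except:
--                 continue
--             pairs.append((key, metric[key]))
--     keys = []
--     for k, _ in pairs:
--         if k not in keys:
--             keys.append(k)
--     return {k: sum(v for k2, v in pairs if k2 == k) for k in keys}
-- ===== Notes on version B (the rewrite author's own statement) =====
-- stated objective: alternative
-- what changed: Replaced the incremental defaultdict accumulator with a two-phase approach: first flatten all accepted (key, value) pairs into one list, then build the result by summing, for each first-appearance key, its matching values from that flat list.
import Mathlib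
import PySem

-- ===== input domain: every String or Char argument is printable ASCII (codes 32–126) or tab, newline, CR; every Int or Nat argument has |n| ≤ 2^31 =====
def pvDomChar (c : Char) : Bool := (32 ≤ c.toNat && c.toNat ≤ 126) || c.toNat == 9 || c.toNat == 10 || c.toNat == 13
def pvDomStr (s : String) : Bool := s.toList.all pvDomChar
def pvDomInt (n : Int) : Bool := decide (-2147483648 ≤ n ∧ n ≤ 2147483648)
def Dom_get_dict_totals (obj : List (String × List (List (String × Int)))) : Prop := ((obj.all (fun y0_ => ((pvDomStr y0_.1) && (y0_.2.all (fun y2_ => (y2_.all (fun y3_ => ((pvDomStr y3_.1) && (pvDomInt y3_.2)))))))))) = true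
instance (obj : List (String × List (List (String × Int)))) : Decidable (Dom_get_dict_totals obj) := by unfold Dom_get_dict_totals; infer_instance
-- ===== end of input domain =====

-- B replaces A's incremental defaultdict accumulator by a flatten-then-sum-per-key pass (objective: alternative).
-- On the typed domain every value is an Int, so the Python `0 + value` numeric probe always succeeds and is absorbed here.

-- ===== PORT A =====
def get_dict_totals (obj : List (String × List (List (String × Int)))) : List (String × Int) :=
  match (PySem.Dict.mk obj).get? "data" with
  | none => []  -- KeyError caught: return dict(empty defaultdict)
  | some data =>
    (data.foldl (fun totals metric =>
        metric.foldl (fun totals kv =>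
          if PySem.Str.endswith kv.1 "_id" || kv.1 == "id" then totals
          else totals.insert kv.1 (totals.getD kv.1 0 + PySem.Dict.getD (PySem.Dict.mk metric) kv.1 0))
        totals)
      PySem.Dict.empty).items

-- ===== PORT B =====
def get_dict_totals_alt (obj : List (String × List (List (String × Int)))) : List (String × Int) :=
  match (PySem.Dict.mk obj).get? "data" with
  | none => []
  | some data =>
    let pairs := data.foldl (fun acc metric =>
      metric.foldl (fun acc kv =>
        if PySem.Str.endswith kv.1 "_id" || kv.1 == "id" then acc
        else acc ++ [(kv.1, PySem.Dict.getD (PySem.Dict.mk metric) kv.1 0)]) acc) []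
    let keys := pairs.foldl (fun ks kv => if ks.contains kv.1 then ks else ks ++ [kv.1]) []
    keys.map (fun k => (k, ((pairs.filter (fun kv => kv.1 == k)).map Prod.snd).sum))

-- ===== PRECONDITION & SPEC =====
def Spec_get_dict_totals (obj : List (String × List (List (String × Int)))) (out : List (String × Int)) : Prop := out = get_dict_totals_alt obj
instance (obj : List (String × List (List (String × Int)))) (out : List (String × Int)) : Decidable (Spec_get_dict_totals obj out) := by unfold Spec_get_dict_totals; infer_instance

-- ===== CLAIM (what is proved, stated in full; the proofs are below) =====
def Claim_equal_get_dict_totals : Prop := ∀ (obj : List (String × List (List (String × Int)))), Dom_get_dict_totals obj → Spec_get_dict_totals obj (get_dict_totals obj)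

-- ===== LEMMAS AND PROOFS =====

-- the shared per-pair filter
def pvKeep (kv : String × Int) : Bool := !(PySem.Str.endswith kv.1 "_id" || kv.1 == "id")

-- getD of A's increment fold is the sum of matching values in the flat pair list
theorem pv_getD_incr_fold (L : List (String × Int)) (d : PySem.Dict String Int) (k : String) :
    (L.foldl (fun d kv => d.insert kv.1 (d.getD kv.1 0 + kv.2)) d).getD k 0
      = d.getD k 0 + ((L.filter (fun kv => kv.1 == k)).map Prod.snd).sum := by
  induction L generalizing d with
  | nil => simp
  | cons p t ih =>
    simp only [List.foldl_cons, ih, List.filter_cons]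
    rw [PySem.Dict.getD_insert]
    by_cases h : p.1 = k
    · subst h
      simp only [beq_self_eq_true, if_pos, List.map_cons, List.sum_cons]
      ring
    · rw [if_neg (fun hk => h hk.symm), if_neg (by simpa using h)]

-- the per-record list of accepted (key, looked-up value) pairs
def pvPairsOf (m : List (String × Int)) : List (String × Int) :=
  (m.filter pvKeep).map (fun kv => (kv.1, PySem.Dict.getD (PySem.Dict.mk m) kv.1 0))

-- B's inner append loop over one record produces exactly pvPairsOf m
theorem pv_inner_pairs (m : List (String × Int)) (acc : List (String × Int)) :
    m.foldl (fun acc kv =>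
        if PySem.Str.endswith kv.1 "_id" || kv.1 == "id" then acc
        else acc ++ [(kv.1, PySem.Dict.getD (PySem.Dict.mk m) kv.1 0)]) acc
      = acc ++ pvPairsOf m := by
  rw [PySem.List.foldl_congr_mem m _
      (fun acc kv => if pvKeep kv
        then acc ++ [(kv.1, PySem.Dict.getD (PySem.Dict.mk m) kv.1 0)] else acc) acc
      (by intro acc kv _
          unfold pvKeep
          cases h : (PySem.Str.endswith kv.1 "_id" || kv.1 == "id") <;> simp_all;
            rcases h with h | h <;> simp [h])]
  exact PySem.List.foldl_append_if _ _ _ _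

-- A's inner accumulation loop over one record is the increment fold over pvPairsOf m
theorem pv_inner_dict (m : List (String × Int)) (d : PySem.Dict String Int) :
    m.foldl (fun totals kv =>
        if PySem.Str.endswith kv.1 "_id" || kv.1 == "id" then totals
        else totals.insert kv.1 (totals.getD kv.1 0 + PySem.Dict.getD (PySem.Dict.mk m) kv.1 0)) d
      = (pvPairsOf m).foldl (fun d kv => d.insert kv.1 (d.getD kv.1 0 + kv.2)) d := by
  rw [PySem.List.foldl_congr_mem m _
      (fun totals kv => if pvKeep kv
        then totals.insert kv.1 (totals.getD kv.1 0 + PySem.Dict.getD (PySem.Dict.mk m) kv.1 0)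
        else totals) d
      (by intro acc kv _
          unfold pvKeep
          cases h : (PySem.Str.endswith kv.1 "_id" || kv.1 == "id") <;> simp_all;
            rcases h with h | h <;> simp [h])]
  rw [PySem.List.foldl_if_eq_foldl_filter]
  unfold pvPairsOf
  rw [List.foldl_map]

theorem get_dict_totals_spec : Claim_equal_get_dict_totals := by
  intro obj _
  unfold Spec_get_dict_totals get_dict_totals get_dict_totals_alt
  cases h : (PySem.Dict.mk obj).get? "data" with
  | none => rfl
  | some data =>
    simp only []
    have hpairs : data.foldl (fun acc metric =>
        metric.foldl (fun acc kv =>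
          if PySem.Str.endswith kv.1 "_id" || kv.1 == "id" then acc
          else acc ++ [(kv.1, PySem.Dict.getD (PySem.Dict.mk metric) kv.1 0)]) acc) []
        = data.flatMap pvPairsOf := by
      rw [PySem.List.foldl_congr_mem data _
          (fun acc metric => acc ++ pvPairsOf metric) []
          (by intro acc m _; exact pv_inner_pairs m acc)]
      simpa using PySem.List.foldl_append_eq_flatMap pvPairsOf data []
    rw [hpairs]
    have hA : data.foldl (fun totals metric =>
        metric.foldl (fun totals kv =>
          if PySem.Str.endswith kv.1 "_id" || kv.1 == "id" then totals
          else totals.insert kv.1 (totals.getD kv.1 0 + PySem.Dict.getD (PySem.Dict.mk metric) kv.1 0))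
        totals) PySem.Dict.empty
        = (data.flatMap pvPairsOf).foldl
            (fun d kv => d.insert kv.1 (d.getD kv.1 0 + kv.2)) PySem.Dict.empty := by
      rw [PySem.List.foldl_congr_mem data _
          (fun d metric => (pvPairsOf metric).foldl
            (fun d kv => d.insert kv.1 (d.getD kv.1 0 + kv.2)) d) PySem.Dict.empty
          (by intro d m _; exact pv_inner_dict m d)]
      exact (List.foldl_flatMap).symm
    rw [hA]
    have hnd : ((data.flatMap pvPairsOf).foldl
        (fun d kv => d.insert kv.1 (d.getD kv.1 0 + kv.2)) PySem.Dict.empty).keys.Nodup :=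
      PySem.Dict.nodup_keys_foldl_insert_key (data.flatMap pvPairsOf) Prod.fst _ _
        PySem.Dict.nodup_keys_empty
    rw [PySem.Dict.items_eq_map_keys _ hnd 0]
    have hkeys : ((data.flatMap pvPairsOf).foldl
        (fun d kv => d.insert kv.1 (d.getD kv.1 0 + kv.2)) PySem.Dict.empty).keys
        = (data.flatMap pvPairsOf).foldl
            (fun ks kv => if ks.contains kv.1 then ks else ks ++ [kv.1]) [] := by
      rw [PySem.Dict.keys_foldl_insert_key]
      have hfm : ((data.flatMap pvPairsOf).map Prod.fst).foldl PySem.Set.add []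
          = (data.flatMap pvPairsOf).foldl (fun ks kv => PySem.Set.add ks kv.1) [] :=
        List.foldl_map
      show PySem.Set.update PySem.Dict.empty.keys ((data.flatMap pvPairsOf).map Prod.fst)
          = (data.flatMap pvPairsOf).foldl (fun ks kv => PySem.Set.add ks kv.1) []
      rw [← hfm]
      rfl
    rw [hkeys]
    refine List.map_congr_left (fun k _ => ?_)
    rw [pv_getD_incr_fold]
    simp
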